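-- pv_equiv track=rewrite | github.com/kyoriku/stellar-blade-guide | server/scripts/images/rename_seed_urls.py | group_images_by_order
-- ===== SOURCE A (Python) =====
-- from collections import defaultdict
--
-- def group_images_by_order(files):
--     groups = defaultdict(list)
--
--     for filename in files:
--         if not filename.lower().endswith(".jpg"):
--             continue
--
--         if "_" not in filename:
--             continue
--
--         order = filename.split("_")[0]
--
--         if not order.isdigit():
--             continue
--
--         groups[int(order)].append(filename)
--
--     # Sort files for each order so they assign in correct sequence
--     for order in groups:
--         groups[order] = sorted(groups[order])
--
--     return groups
-- ===== SOURCE B (Python) =====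
-- from collections import defaultdict
--
-- def _insort(group, name):
--     i = 0
--     while i < len(group) and group[i] <= name:
--         i += 1
--     group.insert(i, name)
--
-- def group_images_by_order(files):
--     groups = defaultdict(list)
--
--     for name in files:
--         if not name.lower().endswith(".jpg"):
--             continue
--         if "_" not in name:
--             continue
--         prefix = name.split("_")[0]
--         if prefix.isdigit():
--             _insort(groups[int(prefix)], name)
--
--     return groups
-- ===== Notes on version B (the rewrite author's own statement) =====
-- stated objective: alternative
-- what changed: B keeps every group sorted online, inserting each filename into its sorted position as it is grouped in a single pass, instead of collecting unsorted groups and running a second sorting pass over them.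
import Mathlib
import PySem

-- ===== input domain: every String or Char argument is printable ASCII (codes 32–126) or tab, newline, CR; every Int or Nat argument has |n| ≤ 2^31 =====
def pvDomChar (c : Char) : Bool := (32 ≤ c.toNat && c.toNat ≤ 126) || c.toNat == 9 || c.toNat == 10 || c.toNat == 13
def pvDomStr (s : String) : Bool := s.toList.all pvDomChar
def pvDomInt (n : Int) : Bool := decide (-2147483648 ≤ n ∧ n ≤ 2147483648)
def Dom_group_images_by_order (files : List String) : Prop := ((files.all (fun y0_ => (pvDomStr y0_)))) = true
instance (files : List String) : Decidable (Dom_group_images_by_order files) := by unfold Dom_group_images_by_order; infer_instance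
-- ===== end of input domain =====

-- B keeps each group sorted online (insertion into sorted position during the single grouping
-- pass) instead of A's collect-then-sort-each-group: an alternative algorithm, similar cost.

-- ===== PORT A =====
-- literal transliteration of A: one guarded loop appending into a defaultdict, then a loop
-- re-assigning each group to its sorted form. int(order) is exact via PySem.Int.ofStr? (order isdigit).
def group_images_by_order (files : List String) : List (Int × List String) :=
  let groups := files.foldl (fun d filename =>
    if !(PySem.Str.endswith (PySem.Str.lower filename) ".jpg") then d
    else if !(PySem.Str.isIn "_" filename) then d
    else
      let order := ((PySem.Str.split? filename "_").getD []).headD ""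
      if !(PySem.Str.strIsdigit order) then d
      else d.modify ((PySem.Int.ofStr? order).getD 0) [] (fun v => v ++ [filename]))
    PySem.Dict.empty
  let groups2 := groups.keys.foldl
    (fun d order => d.insert order (PySem.List.sorted (d.getD order []) (fun x => x) false)) groups
  groups2.items

-- ===== PORT B =====
-- _insort: scan left to right past the elements ≤ name, insert name there (stable insertion)
def pvInsort : List String → String → List String
  | [], name => [name]
  | a :: t, name => if a ≤ name then a :: pvInsort t name else name :: a :: t

def group_images_by_order_alt (files : List String) : List (Int × List String) :=
  (files.foldl (fun d name =>
    if !(PySem.Str.endswith (PySem.Str.lower name) ".jpg") then d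
    else if !(PySem.Str.isIn "_" name) then d
    else
      let pre := ((PySem.Str.split? name "_").getD []).headD ""
      if PySem.Str.strIsdigit pre then
        d.modify ((PySem.Int.ofStr? pre).getD 0) [] (fun g => pvInsort g name)
      else d)
    PySem.Dict.empty).items

-- ===== PRECONDITION & SPEC =====
def Spec_group_images_by_order (files : List String) (out : List (Int × List String)) : Prop := out = group_images_by_order_alt files
instance (files : List String) (out : List (Int × List String)) : Decidable (Spec_group_images_by_order files out) := by unfold Spec_group_images_by_order; infer_instance

-- ===== CLAIM =====
def Claim_equal_group_images_by_order : Prop := ∀ (files : List String), Dom_group_images_by_order files → Spec_group_images_by_order files (group_images_by_order files)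

-- ===== LEMMAS AND PROOFS =====

-- shared names for the proofs (not used by the ports)
def pvKeyOf (f : String) : Int :=
  (PySem.Int.ofStr? (((PySem.Str.split? f "_").getD []).headD "")).getD 0

def pvValid (f : String) : Bool :=
  PySem.Str.endswith (PySem.Str.lower f) ".jpg" && PySem.Str.isIn "_" f &&
    PySem.Str.strIsdigit (((PySem.Str.split? f "_").getD []).headD "")

def pvParsed (files : List String) : List (Int × String) :=
  (files.filter pvValid).map (fun f => (pvKeyOf f, f))

def pvKeys (files : List String) : List Int :=
  PySem.Set.ofList ((pvParsed files).map (fun p => p.1))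

def pvGroupsA (files : List String) : PySem.Dict Int (List String) :=
  (pvParsed files).foldl (fun d p => d.modify p.1 [] (fun v => v ++ [p.2])) PySem.Dict.empty

def pvD2 (files : List String) : PySem.Dict Int (List String) :=
  (pvGroupsA files).keys.foldl
    (fun d k => d.insert k (PySem.List.sorted (d.getD k []) (fun x => x) false)) (pvGroupsA files)

def pvDictB (files : List String) : PySem.Dict Int (List String) :=
  (pvParsed files).foldl (fun d p => d.modify p.1 [] (fun v => pvInsort v p.2)) PySem.Dict.empty

theorem pvAdd_mem {s : PySem.Set Int} {y : Int} (h : y ∈ s) : PySem.Set.add s y = s := by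
  simp [PySem.Set.add, h]

theorem pvUpdate_of_subset (l : List Int) (s : PySem.Set Int) (h : ∀ x ∈ l, x ∈ s) :
    PySem.Set.update s l = s := by
  induction l generalizing s with
  | nil => simp [PySem.Set.update]
  | cons x l ih =>
    have hx : PySem.Set.add s x = s := pvAdd_mem (h x (List.mem_cons_self))
    simp only [PySem.Set.update, List.foldl_cons] at *
    rw [hx]
    exact ih s (fun y hy => h y (List.mem_cons_of_mem _ hy))

theorem pvGuardA {α : Type} (a b c : Bool) (d m : α) :
    (if !a then d else if !b then d else if !c then d else m)
      = (if a && b && c then m else d) := by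
  cases a <;> cases b <;> cases c <;> simp

theorem pvGuardB {α : Type} (a b c : Bool) (d m : α) :
    (if !a then d else if !b then d else if c then m else d)
      = (if a && b && c then m else d) := by
  cases a <;> cases b <;> cases c <;> simp

-- A's step function, as a guarded single-step update
theorem pvStepA_eq :
    (fun (d : PySem.Dict Int (List String)) filename =>
      if !(PySem.Str.endswith (PySem.Str.lower filename) ".jpg") then d
      else if !(PySem.Str.isIn "_" filename) then d
      else
        let order := ((PySem.Str.split? filename "_").getD []).headD ""
        if !(PySem.Str.strIsdigit order) then d
        else d.modify ((PySem.Int.ofStr? order).getD 0) [] (fun v => v ++ [filename]))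
    = (fun d f => if pvValid f then d.modify (pvKeyOf f) [] (fun v => v ++ [f]) else d) := by
  funext d f
  exact pvGuardA (PySem.Str.endswith (PySem.Str.lower f) ".jpg") (PySem.Str.isIn "_" f)
    (PySem.Str.strIsdigit (((PySem.Str.split? f "_").getD []).headD "")) d
    (d.modify ((PySem.Int.ofStr? (((PySem.Str.split? f "_").getD []).headD "")).getD 0) []
      (fun v => v ++ [f]))

-- B's step function, as the same guarded shape with pvInsort
theorem pvStepB_eq :
    (fun (d : PySem.Dict Int (List String)) name =>
      if !(PySem.Str.endswith (PySem.Str.lower name) ".jpg") then d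
      else if !(PySem.Str.isIn "_" name) then d
      else
        let pre := ((PySem.Str.split? name "_").getD []).headD ""
        if PySem.Str.strIsdigit pre then
          d.modify ((PySem.Int.ofStr? pre).getD 0) [] (fun g => pvInsort g name)
        else d)
    = (fun d f => if pvValid f then d.modify (pvKeyOf f) [] (fun v => pvInsort v f) else d) := by
  funext d f
  exact pvGuardB (PySem.Str.endswith (PySem.Str.lower f) ".jpg") (PySem.Str.isIn "_" f)
    (PySem.Str.strIsdigit (((PySem.Str.split? f "_").getD []).headD "")) d
    (d.modify ((PySem.Int.ofStr? (((PySem.Str.split? f "_").getD []).headD "")).getD 0) []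
      (fun v => pvInsort v f))

-- the second loop of A: overwriting every existing key with a function of its own value
theorem pvFoldIns (g : List String → List String) :
    ∀ (ks : List Int) (d : PySem.Dict Int (List String)), ks.Nodup → ∀ j,
      (ks.foldl (fun d k => d.insert k (g (d.getD k []))) d).getD j []
        = if j ∈ ks then g (d.getD j []) else d.getD j [] := by
  intro ks
  induction ks with
  | nil => intro d _ j; simp
  | cons k ks ih =>
    intro d hnd j
    obtain ⟨hk, hnd'⟩ := List.nodup_cons.1 hnd
    simp only [List.foldl_cons]
    rw [ih _ hnd' j]
    by_cases hj : j = k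
    · subst hj
      simp [hk, PySem.Dict.getD_insert_self]
    · rw [PySem.Dict.getD_insert_of_ne _ _ _ hj]
      by_cases hjks : j ∈ ks <;> simp [hjks, hj, List.mem_cons]

theorem pvA_eq (files : List String) : group_images_by_order files = (pvD2 files).items := by
  unfold group_images_by_order pvD2 pvGroupsA pvParsed
  rw [pvStepA_eq, List.foldl_map, List.foldl_filter]

theorem pvB_eq (files : List String) : group_images_by_order_alt files = (pvDictB files).items := by
  unfold group_images_by_order_alt pvDictB pvParsed
  rw [pvStepB_eq, List.foldl_map, List.foldl_filter]

theorem pvKeysA (files : List String) : (pvGroupsA files).keys = pvKeys files := by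
  unfold pvGroupsA pvKeys
  rw [PySem.Dict.keys_foldl_modify_key (pvParsed files) (fun p => p.1) []
    (fun _ p => fun v => v ++ [p.2]) PySem.Dict.empty]
  rfl

theorem pvNodupA (files : List String) : (pvGroupsA files).keys.Nodup := by
  rw [pvKeysA]; exact PySem.Set.nodup_ofList _

theorem pvValA (files : List String) (c : Int) :
    (pvGroupsA files).getD c [] = ((pvParsed files).filter (fun p => p.1 == c)).map
      (fun x => x.2) := by
  unfold pvGroupsA
  rw [PySem.Dict.getD_foldl_modify_append]
  rfl

theorem pvItemsA (files : List String) :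
    (pvD2 files).items = (pvKeys files).map (fun k =>
      (k, PySem.List.sorted (((pvParsed files).filter (fun p => p.1 == k)).map (fun x => x.2))
        (fun x => x) false)) := by
  have hk2 : (pvD2 files).keys = (pvGroupsA files).keys := by
    unfold pvD2
    rw [PySem.Dict.keys_foldl_insert]
    exact pvUpdate_of_subset _ _ (fun x hx => hx)
  have hv2 := pvFoldIns (fun v => PySem.List.sorted v (fun x => x) false)
    (pvGroupsA files).keys (pvGroupsA files) (pvNodupA files)
  rw [PySem.Dict.items_eq_map_keys (pvD2 files) (by rw [hk2]; exact pvNodupA files) [],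
    hk2, pvKeysA]
  apply List.map_congr_left
  intro k hkmem
  have hmem : k ∈ (pvGroupsA files).keys := by rw [pvKeysA]; exact hkmem
  rw [show ((pvD2 files).getD k []) = _ from hv2 k, if_pos hmem, pvValA]

-- a grouping loop with an arbitrary per-element group update
theorem pvGetDFold (F : List String → String → List String)
    (l : List (Int × String)) (d : PySem.Dict Int (List String)) (c : Int) :
    (l.foldl (fun d p => d.modify p.1 [] (fun v => F v p.2)) d).getD c []
      = (l.filter (fun p => p.1 == c)).foldl (fun v p => F v p.2) (d.getD c []) := by
  induction l generalizing d with
  | nil => rfl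
  | cons p l ih =>
    simp only [List.foldl_cons, List.filter_cons]
    rw [ih, PySem.Dict.getD_modify]
    by_cases h : p.1 = c
    · have hb : (p.1 == c) = true := by simp [h]
      rw [hb, if_pos h.symm, h]
      simp
    · have hb : (p.1 == c) = false := by simp [h]
      rw [hb, if_neg (fun hc => h hc.symm)]
      simp

theorem pvInsort_perm (g : List String) (x : String) : (pvInsort g x).Perm (x :: g) := by
  induction g with
  | nil => simp [pvInsort]
  | cons a t ih =>
    simp only [pvInsort]
    split
    · exact (ih.cons a).trans (List.Perm.swap x a t)
    · exact List.Perm.refl _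

theorem pvInsort_pairwise (g : List String) (x : String) (h : g.Pairwise (· ≤ ·)) :
    (pvInsort g x).Pairwise (· ≤ ·) := by
  induction g with
  | nil => simp [pvInsort]
  | cons a t ih =>
    obtain ⟨ha, ht⟩ := List.pairwise_cons.1 h
    simp only [pvInsort]
    split
    · rename_i hax
      refine List.pairwise_cons.2 ⟨fun y hy => ?_, ih ht⟩
      rcases List.mem_cons.1 ((pvInsort_perm t x).mem_iff.1 hy) with rfl | hyt
      · exact hax
      · exact ha y hyt
    · rename_i hax
      have hxa : x ≤ a := le_of_not_ge hax
      refine List.pairwise_cons.2 ⟨fun y hy => ?_, h⟩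
      rcases List.mem_cons.1 hy with rfl | hyt
      · exact hxa
      · exact le_trans hxa (ha y hyt)

theorem pvFoldInsort (L : List String) :
    ∀ acc, acc.Pairwise (· ≤ ·) →
      (L.foldl pvInsort acc).Pairwise (· ≤ ·) ∧ (L.foldl pvInsort acc).Perm (acc ++ L) := by
  induction L with
  | nil => intro acc h; exact ⟨h, by simp⟩
  | cons x L ih =>
    intro acc h
    obtain ⟨hp, hperm⟩ := ih (pvInsort acc x) (pvInsort_pairwise acc x h)
    exact ⟨hp, hperm.trans (((pvInsort_perm acc x).append_right L).trans List.perm_middle.symm)⟩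

theorem pvSortEq (L : List String) :
    PySem.List.sorted L (fun x => x) false = L.foldl pvInsort [] := by
  obtain ⟨hp, hperm⟩ := pvFoldInsort L [] List.Pairwise.nil
  exact PySem.List.sorted_id_eq_of_perm_of_pairwise L (L.foldl pvInsort [])
    (by simpa using hperm) hp

theorem pvItemsB (files : List String) :
    (pvDictB files).items = (pvKeys files).map (fun k =>
      (k, ((pvParsed files).filter (fun p => p.1 == k)).foldl (fun v p => pvInsort v p.2) [])) := by
  have hk : (pvDictB files).keys = pvKeys files := by
    unfold pvDictB pvKeys
    rw [PySem.Dict.keys_foldl_modify_key (pvParsed files) (fun p => p.1) []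
      (fun _ p => fun v => pvInsort v p.2) PySem.Dict.empty]
    rfl
  have hnd : (pvDictB files).keys.Nodup := by rw [hk]; exact PySem.Set.nodup_ofList _
  rw [PySem.Dict.items_eq_map_keys (pvDictB files) hnd [], hk]
  refine List.map_congr_left (fun k _ => ?_)
  unfold pvDictB
  rw [pvGetDFold]
  simp [PySem.Dict.getD, PySem.Dict.get?, PySem.Dict.empty]

-- ===== VERDICT =====
theorem group_images_by_order_spec : Claim_equal_group_images_by_order := by
  intro files _
  unfold Spec_group_images_by_order
  rw [pvA_eq, pvB_eq, pvItemsA, pvItemsB]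
  refine List.map_congr_left (fun k _ => ?_)
  rw [pvSortEq, List.foldl_map]
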